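-- pv_equiv track=rewrite | github.com/jimmo/pycon-au-2017 | microbit/decode.py | lfsr_decode
-- ===== SOURCE A (Python) =====
-- def lfsr_decode(word, data):
--   word = word & 0xff
--   for i in range(8):
--     if word & 0x80:
--       word ^= 0x11
--       data ^= (1 << (7-i))
--     word = (word << 1) & 0xff
--   return (word, data)
-- ===== SOURCE B (Python) =====
-- # The LFSR step w -> ((w << 1) & 0xff) ^ (0x22 if w & 0x80 else 0) is GF(2)-linear
-- # in the byte, and the data mask collects bit7 at each step, also linear.  So the
-- # whole 8-step decode is a linear map: decompose the byte into its set bits and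
-- # XOR together the precomputed contribution of each bit.  FINAL[j]/MASK[j] are the
-- # (final_word, data_mask) the map produces on the single-bit input 1 << j.
-- FINAL = [34, 68, 136, 50, 100, 200, 178, 70]
-- MASK = [1, 2, 4, 9, 18, 36, 73, 147]
--
--
-- def lfsr_decode(word, data):
--     v = word & 0xff
--     w = 0
--     m = 0
--     for j in range(8):
--         if (v >> j) & 1:
--             w ^= FINAL[j]
--             m ^= MASK[j]
--     return (w, data ^ m)
-- ===== Notes on version B (the rewrite author's own statement) =====
-- stated objective: alternative
-- what changed: Exploits GF(2)-linearity of the LFSR step: instead of A's sequential 8-step feedback loop, B XORs precomputed per-bit basis contributions (final word and data mask) for each set bit of the input byte.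
import Mathlib
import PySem

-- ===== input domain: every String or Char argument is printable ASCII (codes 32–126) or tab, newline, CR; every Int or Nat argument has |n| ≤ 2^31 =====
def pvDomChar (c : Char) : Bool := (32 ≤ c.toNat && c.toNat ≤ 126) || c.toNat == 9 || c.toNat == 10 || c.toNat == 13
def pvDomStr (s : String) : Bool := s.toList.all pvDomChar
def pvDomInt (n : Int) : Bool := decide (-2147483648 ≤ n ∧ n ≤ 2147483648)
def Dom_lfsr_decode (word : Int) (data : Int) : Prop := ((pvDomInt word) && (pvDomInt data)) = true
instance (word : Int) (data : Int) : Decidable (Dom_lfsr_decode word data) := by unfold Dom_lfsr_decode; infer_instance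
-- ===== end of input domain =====

-- B replaces A's sequential 8-step feedback loop by XOR of a precomputed per-bit basis (the LFSR map is GF(2)-linear in the byte); return values proved equal.

-- ===== PORT A =====
-- one iteration of A's `for i in range(8)` body, state = (word, data)
def lfsrStepA (s : Int × Int) (i : Nat) : Int × Int :=
  let s' := if PySem.Int.band s.1 128 ≠ 0
            then (PySem.Int.bxor s.1 17, PySem.Int.bxor s.2 (1 <<< (7 - i)))
            else s
  (PySem.Int.band (s'.1 <<< 1) 255, s'.2)

def lfsr_decode (word : Int) (data : Int) : Int × Int :=
  List.foldl lfsrStepA (PySem.Int.band word 255, data) (List.range 8)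

-- ===== PORT B =====
-- Source B's module-level basis constants FINAL and MASK
def lfsrFinal : List Int := [34, 68, 136, 50, 100, 200, 178, 70]
def lfsrMask : List Int := [1, 2, 4, 9, 18, 36, 73, 147]

-- Source B's `for j in range(8)` accumulation of (w, m) for byte v
def lfsrCore (v : Int) : Int × Int :=
  List.foldl
    (fun (s : Int × Int) (j : Nat) =>
      if PySem.Int.band (v >>> j) 1 ≠ 0 then
        (PySem.Int.bxor s.1 ((PySem.List.pyGet? lfsrFinal (j : Int)).getD 0),
         PySem.Int.bxor s.2 ((PySem.List.pyGet? lfsrMask (j : Int)).getD 0))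
      else s)
    (0, 0) (List.range 8)

def lfsr_decode_alt (word : Int) (data : Int) : Int × Int :=
  let s := lfsrCore (PySem.Int.band word 255)
  (s.1, PySem.Int.bxor data s.2)

-- ===== PRECONDITION & SPEC =====
def Spec_lfsr_decode (word : Int) (data : Int) (out : Int × Int) : Prop := out = lfsr_decode_alt word data
instance (word : Int) (data : Int) (out : Int × Int) : Decidable (Spec_lfsr_decode word data out) := by unfold Spec_lfsr_decode; infer_instance

-- ===== CLAIM =====
def Claim_equal_lfsr_decode : Prop := ∀ (word : Int) (data : Int), Dom_lfsr_decode word data → Spec_lfsr_decode word data (lfsr_decode word data)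

-- ===== LEMMAS AND PROOFS =====

theorem bxor_nonneg (a b : Int) (ha : 0 ≤ a) (hb : 0 ≤ b) : 0 ≤ PySem.Int.bxor a b := by
  simp [PySem.Int.bxor, ha, hb]

-- associativity of Python xor when the two right operands are nonnegative
theorem bxor_assoc_nonneg (d b y : Int) (hb : 0 ≤ b) (hy : 0 ≤ y) :
    PySem.Int.bxor (PySem.Int.bxor d b) y = PySem.Int.bxor d (PySem.Int.bxor b y) := by
  by_cases hd : 0 ≤ d
  · simp [PySem.Int.bxor, hd, hb, hy, Nat.xor_assoc]
  · simp only [PySem.Int.bxor, if_pos hb, if_pos hy, if_neg hd]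
    have h1 : ¬ (0 ≤ -(((-d - 1).toNat ^^^ b.toNat : Nat) : Int) - 1) := by omega
    simp only [if_neg h1]
    have h2 : (-(-(((-d - 1).toNat ^^^ b.toNat : Nat) : Int) - 1) - 1).toNat
        = (-d - 1).toNat ^^^ b.toNat := by omega
    have h3 : ((((b.toNat ^^^ y.toNat : Nat) : Int)).toNat) = b.toNat ^^^ y.toNat := by omega
    rw [h2]
    simp [Nat.xor_assoc]

theorem mask_nonneg (l : List Nat) : ∀ w d : Int, 0 ≤ d →
    0 ≤ (List.foldl lfsrStepA (w, d) l).2 := by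
  induction l with
  | nil => intro w d hd; simpa using hd
  | cons i l ih =>
      intro w d hd
      simp only [List.foldl_cons]
      by_cases hc : PySem.Int.band w 128 ≠ 0
      · simp only [lfsrStepA, if_pos hc]
        exact ih _ _ (bxor_nonneg d _ hd (by positivity))
      · simp only [lfsrStepA, if_neg hc]
        exact ih _ _ hd

-- A's data accumulator factors out: the loop XORs a mask independent of data
theorem lfsr_factor (l : List Nat) : ∀ w d : Int,
    List.foldl lfsrStepA (w, d) l
      = ((List.foldl lfsrStepA (w, 0) l).1,
         PySem.Int.bxor d (List.foldl lfsrStepA (w, 0) l).2) := by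
  induction l with
  | nil => intro w d; simp [PySem.Int.bxor_zero]
  | cons i l ih =>
      intro w d
      simp only [List.foldl_cons]
      by_cases hc : PySem.Int.band w 128 ≠ 0
      · simp only [lfsrStepA, if_pos hc]
        rw [ih _ (PySem.Int.bxor d (1 <<< (7 - i))), ih _ (PySem.Int.bxor 0 (1 <<< (7 - i)))]
        have hz : PySem.Int.bxor 0 (1 <<< (7 - i)) = 1 <<< (7 - i) := by
          rw [PySem.Int.bxor_comm]; exact PySem.Int.bxor_zero _
        rw [hz, bxor_assoc_nonneg d (1 <<< (7 - i)) _ (by positivity)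
              (mask_nonneg l _ 0 le_rfl)]
      · simp only [lfsrStepA, if_neg hc]
        exact ih _ d

theorem band255_bounds (w : Int) : 0 ≤ PySem.Int.band w 255 ∧ PySem.Int.band w 255 < 256 := by
  by_cases h : 0 ≤ w
  · simp only [PySem.Int.band, if_pos h, if_pos (by norm_num : (0:Int) ≤ 255)]
    have := Nat.and_le_right (n := w.toNat) (m := (255:Int).toNat)
    omega
  · simp only [PySem.Int.band, if_neg h, if_pos (by norm_num : (0:Int) ≤ 255)]
    omega

-- on every byte, A's loop (with data 0) and B's basis superposition agree
set_option maxRecDepth 4096 in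
theorem core_eq : ∀ n : Fin 256,
    List.foldl lfsrStepA (((n : Nat) : Int), 0) (List.range 8) = lfsrCore ((n : Nat) : Int) := by
  decide

-- ===== VERDICT =====
theorem lfsr_decode_spec : Claim_equal_lfsr_decode := by
  intro word data _
  unfold Spec_lfsr_decode lfsr_decode lfsr_decode_alt
  obtain ⟨h0, h1⟩ := band255_bounds word
  have hn : PySem.Int.band word 255 = (((PySem.Int.band word 255).toNat : Nat) : Int) :=
    (Int.toNat_of_nonneg h0).symm
  have hlt : (PySem.Int.band word 255).toNat < 256 := by omega
  rw [lfsr_factor (List.range 8) (PySem.Int.band word 255) data, hn,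
      core_eq ⟨(PySem.Int.band word 255).toNat, hlt⟩]
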